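-- pv_equiv track=rewrite | github.com/bingdeo/Kaist_Mobility_Challenge | smyd/tools/zone_generator.py | cluster_pairs
-- ===== SOURCE A (Python) =====
-- def cluster_pairs(pairs, max_gap=5):
--     """
--     pairs: list of (i, j, dist) sorted by i
--     clusters: list of list[(i,j,dist)]
--     New cluster if i gap or j gap is too large.
--     """
--     if not pairs:
--         return []
--     pairs = sorted(pairs, key=lambda x: x[0])
--     clusters = []
--     cur = [pairs[0]]
--     for a, b in zip(pairs, pairs[1:]):
--         i0, j0, _ = a
--         i1, j1, _ = b
--         if (i1 - i0) > max_gap or abs(j1 - j0) > max_gap: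
--             clusters.append(cur)
--             cur = [b]
--         else:
--             cur.append(b)
--     clusters.append(cur)
--     return clusters
-- ===== SOURCE B (Python) =====
-- def cluster_pairs(pairs, max_gap=5):
--     """Staged: first build a table of cut indices from adjacent gaps, then
--     materialise the clusters by slicing the sorted list between boundaries."""
--     if not pairs:
--         return []
--     ps = sorted(pairs, key=lambda x: x[0])
--     cuts = [k + 1 for k, (a, b) in enumerate(zip(ps, ps[1:]))
--             if b[0] - a[0] > max_gap or abs(b[1] - a[1]) > max_gap]
--     bounds = [0] + cuts + [len(ps)]
--     return [ps[s:e] for s, e in zip(bounds, bounds[1:])]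
-- ===== Notes on version B (the rewrite author's own statement) =====
-- stated objective: alternative
-- what changed: B replaces A's single accumulator-flushing scan by two staged passes: it first builds a table of cut indices from the adjacent-gap condition, then produces the clusters by slicing the sorted list between successive boundaries.
import Mathlib
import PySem

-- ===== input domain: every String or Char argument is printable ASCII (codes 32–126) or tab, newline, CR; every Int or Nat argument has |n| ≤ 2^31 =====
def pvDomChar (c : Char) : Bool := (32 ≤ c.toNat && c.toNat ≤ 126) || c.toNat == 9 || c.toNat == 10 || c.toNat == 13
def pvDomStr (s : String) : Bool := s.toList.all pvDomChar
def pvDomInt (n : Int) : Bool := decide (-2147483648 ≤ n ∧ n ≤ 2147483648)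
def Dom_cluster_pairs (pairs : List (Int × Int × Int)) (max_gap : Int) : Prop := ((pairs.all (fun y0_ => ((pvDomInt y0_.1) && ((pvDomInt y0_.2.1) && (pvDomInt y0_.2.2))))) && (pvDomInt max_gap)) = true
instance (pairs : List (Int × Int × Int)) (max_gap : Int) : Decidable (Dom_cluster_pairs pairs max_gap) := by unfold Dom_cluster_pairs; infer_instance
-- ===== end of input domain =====

-- B is staged: it first builds a table of cut indices from the adjacent-gap condition,
-- then slices the sorted list between successive boundaries; alternative decomposition, same cost.

-- ===== PORT A =====
def cluster_pairs (pairs : List (Int × Int × Int)) (max_gap : Int) : List (List (Int × Int × Int)) :=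
  if pairs = [] then []
  else
    let ps := PySem.List.sorted pairs (fun x => x.1)
    match PySem.List.pyGet? ps 0 with
    | none => []  -- unreachable: ps is nonempty
    | some p0 =>
      let st := (ps.zip ps.tail).foldl
        (fun (st : List (List (Int × Int × Int)) × List (Int × Int × Int)) ab =>
          if ab.2.1 - ab.1.1 > max_gap ∨ |ab.2.2.1 - ab.1.2.1| > max_gap
          then (st.1 ++ [st.2], [ab.2])
          else (st.1, st.2 ++ [ab.2]))
        ([], [p0])
      st.1 ++ [st.2]

-- ===== PORT B =====
def cluster_pairs_alt (pairs : List (Int × Int × Int)) (max_gap : Int) : List (List (Int × Int × Int)) :=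
  if pairs = [] then []
  else
    let ps := PySem.List.sorted pairs (fun x => x.1)
    -- cuts = [k+1 for k,(a,b) in enumerate(zip(ps, ps[1:])) if gap]
    let cuts := (PySem.List.enumerate (ps.zip (PySem.List.slice ps (some 1) none))).filterMap
      (fun kab =>
        if kab.2.2.1 - kab.2.1.1 > max_gap ∨ |kab.2.2.2.1 - kab.2.1.2.1| > max_gap
        then some (kab.1 + 1) else none)
    let bounds := 0 :: cuts ++ [(ps.length : Int)]
    (bounds.zip bounds.tail).map (fun se => PySem.List.slice ps (some se.1) (some se.2))

-- ===== PRECONDITION & SPEC =====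
def Spec_cluster_pairs (pairs : List (Int × Int × Int)) (max_gap : Int) (out : List (List (Int × Int × Int))) : Prop := out = cluster_pairs_alt pairs max_gap
instance (pairs : List (Int × Int × Int)) (max_gap : Int) (out : List (List (Int × Int × Int))) : Decidable (Spec_cluster_pairs pairs max_gap out) := by unfold Spec_cluster_pairs; infer_instance

-- ===== CLAIM (what is proved, stated in full; the proofs are below) =====
def Claim_equal_cluster_pairs : Prop := ∀ (pairs : List (Int × Int × Int)) (max_gap : Int), Dom_cluster_pairs pairs max_gap → Spec_cluster_pairs pairs max_gap (cluster_pairs pairs max_gap)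

-- ===== LEMMAS AND PROOFS =====

-- reference: given the head x and the remaining sorted elements, (tail of the first cluster, remaining clusters)
def pvGrpT (g : Int) : (Int × Int × Int) → List (Int × Int × Int) → List (Int × Int × Int) × List (List (Int × Int × Int))
  | _, [] => ([], [])
  | x, y :: ys =>
    let r := pvGrpT g y ys
    if y.1 - x.1 > g ∨ |y.2.1 - x.2.1| > g then ([], (y :: r.1) :: r.2) else (y :: r.1, r.2)

-- relative break positions (1-based) of the adjacency scan starting at x
def pvCut (g : Int) : (Int × Int × Int) → List (Int × Int × Int) → List Nat
  | _, [] => []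
  | x, y :: ys =>
    if y.1 - x.1 > g ∨ |y.2.1 - x.2.1| > g
    then 1 :: (pvCut g y ys).map (· + 1)
    else (pvCut g y ys).map (· + 1)

-- segments of l between successive Nat boundaries
def pvSegs (l : List (Int × Int × Int)) (bs : List Nat) : List (List (Int × Int × Int)) :=
  (bs.zip bs.tail).map (fun se => (l.drop se.1).take (se.2 - se.1))

lemma pvA_loop (g : Int) (ys : List (Int × Int × Int)) : ∀ (x : Int × Int × Int)
    (cls : List (List (Int × Int × Int))) (cur : List (Int × Int × Int)),
    (((x :: ys).zip ys).foldl
      (fun (st : List (List (Int × Int × Int)) × List (Int × Int × Int)) ab =>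
        if ab.2.1 - ab.1.1 > g ∨ |ab.2.2.1 - ab.1.2.1| > g
        then (st.1 ++ [st.2], [ab.2]) else (st.1, st.2 ++ [ab.2])) (cls, cur)).1
      ++ [(((x :: ys).zip ys).foldl
      (fun (st : List (List (Int × Int × Int)) × List (Int × Int × Int)) ab =>
        if ab.2.1 - ab.1.1 > g ∨ |ab.2.2.1 - ab.1.2.1| > g
        then (st.1 ++ [st.2], [ab.2]) else (st.1, st.2 ++ [ab.2])) (cls, cur)).2]
      = cls ++ (cur ++ (pvGrpT g x ys).1) :: (pvGrpT g x ys).2 := by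
  induction ys with
  | nil => intro x cls cur; simp [pvGrpT]
  | cons y ys ih =>
    intro x cls cur
    simp only [List.zip_cons_cons, List.foldl_cons]
    by_cases h : y.1 - x.1 > g ∨ |y.2.1 - x.2.1| > g
    · simp only [if_pos h]
      rw [ih y (cls ++ [cur]) [y]]
      simp [pvGrpT, h]
    · simp only [if_neg h]
      rw [ih y cls (cur ++ [y])]
      simp [pvGrpT, h]

-- the cut-collecting comprehension computes pvCut shifted by the enumeration start
lemma pvB_cuts (g : Int) (ys : List (Int × Int × Int)) : ∀ (x : Int × Int × Int) (s : Int),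
    (PySem.List.enumerate ((x :: ys).zip ys) s).filterMap
      (fun kab =>
        if kab.2.2.1 - kab.2.1.1 > g ∨ |kab.2.2.2.1 - kab.2.1.2.1| > g
        then some (kab.1 + 1) else none)
      = (pvCut g x ys).map (fun n : Nat => s + (n : Int)) := by
  induction ys with
  | nil => intro x s; simp [PySem.List.enumerate_nil, pvCut]
  | cons y ys ih =>
    intro x s
    rw [List.zip_cons_cons, PySem.List.enumerate_cons, List.filterMap_cons]
    by_cases h : y.1 - x.1 > g ∨ |y.2.1 - x.2.1| > g
    · rw [if_pos h, ih y (s + 1)]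
      show ((s + 1) :: (pvCut g y ys).map fun n : Nat => s + 1 + (n : Int))
          = (pvCut g (x) (y :: ys)).map fun n : Nat => s + (n : Int)
      rw [pvCut, if_pos h, List.map_cons, List.map_map]
      refine congrArg₂ _ (by push_cast; ring) (List.map_congr_left fun n _ => ?_)
      show s + 1 + (n : Int) = s + ((n + 1 : Nat) : Int)
      push_cast; ring
    · rw [if_neg h, ih y (s + 1)]
      show ((pvCut g y ys).map fun n : Nat => s + 1 + (n : Int))
          = (pvCut g (x) (y :: ys)).map fun n : Nat => s + (n : Int)
      rw [pvCut, if_neg h, List.map_map]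
      refine List.map_congr_left fun n _ => ?_
      show s + 1 + (n : Int) = s + ((n + 1 : Nat) : Int)
      push_cast; ring

-- shifting all boundaries by one drops the new head element
lemma pvSegs_shift (x : Int × Int × Int) (l : List (Int × Int × Int)) (bs : List Nat) :
    pvSegs (x :: l) (bs.map (· + 1)) = pvSegs l bs := by
  unfold pvSegs
  rw [← List.map_tail, List.zip_map, List.map_map]
  refine List.map_congr_left ?_
  intro se _
  simp

lemma pvSegs_cons (l : List (Int × Int × Int)) (b : Nat) (bs : List Nat) :
    pvSegs l (0 :: b :: bs) = l.take b :: pvSegs l (b :: bs) := by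
  simp [pvSegs]

lemma pvSegs_zero_shift (x : Int × Int × Int) (l : List (Int × Int × Int)) (b : Nat)
    (bs : List Nat) :
    pvSegs (x :: l) (0 :: (b :: bs).map (· + 1)) = (x :: l.take b) :: pvSegs l (b :: bs) := by
  rw [show ((b :: bs).map (· + 1)) = (b + 1) :: bs.map (· + 1) from rfl, pvSegs_cons,
      show ((b + 1) :: bs.map (· + 1)) = (b :: bs).map (· + 1) from rfl, pvSegs_shift,
      List.take_succ_cons]

-- main: slicing at the cut boundaries yields the reference clusters
lemma pvB_main (g : Int) (ys : List (Int × Int × Int)) : ∀ (x : Int × Int × Int),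
    pvSegs (x :: ys) (0 :: pvCut g x ys ++ [ys.length + 1])
      = (x :: (pvGrpT g x ys).1) :: (pvGrpT g x ys).2 := by
  induction ys with
  | nil => intro x; simp [pvCut, pvGrpT, pvSegs]
  | cons y ys ih =>
    intro x
    have hne : pvCut g y ys ++ [ys.length + 1] ≠ [] := by simp
    obtain ⟨b, bs, hbs⟩ := List.exists_cons_of_ne_nil hne
    have hIH := ih y
    rw [List.cons_append, hbs, pvSegs_cons, List.cons.injEq] at hIH
    obtain ⟨h1, h2⟩ := hIH
    rw [List.cons_append]
    by_cases h : y.1 - x.1 > g ∨ |y.2.1 - x.2.1| > g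
    · have hb : pvCut g x (y :: ys) ++ [(y :: ys).length + 1]
          = (0 :: b :: bs).map (· + 1) := by
        simp [pvCut, h, List.length_cons, ← hbs, List.map_append]
      rw [hb, pvSegs_zero_shift, pvSegs_cons, h1, h2]
      simp [pvGrpT, h]
    · have hb : pvCut g x (y :: ys) ++ [(y :: ys).length + 1]
          = (b :: bs).map (· + 1) := by
        simp [pvCut, h, List.length_cons, ← hbs, List.map_append]
      rw [hb, pvSegs_zero_shift, h1, h2]
      simp [pvGrpT, h]

-- Int-cast boundaries slice exactly the Nat segments
lemma pvSegs_cast (l : List (Int × Int × Int)) (bs : List Nat) :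
    ((bs.map (Nat.cast : Nat → Int)).zip (bs.map (Nat.cast : Nat → Int)).tail).map
      (fun se => PySem.List.slice l (some se.1) (some se.2)) = pvSegs l bs := by
  unfold pvSegs
  rw [← List.map_tail, List.zip_map, List.map_map]
  refine List.map_congr_left ?_
  intro se _
  simp [PySem.List.slice_natCast]

-- ===== VERDICT (by name: the statement is the Claim_ definition above) =====
theorem cluster_pairs_spec : Claim_equal_cluster_pairs := by
  intro pairs g _
  unfold Spec_cluster_pairs cluster_pairs cluster_pairs_alt
  by_cases hp : pairs = []
  · simp [hp]
  · simp only [if_neg hp]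
    have hlen : (PySem.List.sorted pairs (fun x => x.1)).length = pairs.length :=
      PySem.List.length_sorted ..
    obtain ⟨p0, rest, hps⟩ : ∃ p0 rest, PySem.List.sorted pairs (fun x => x.1) = p0 :: rest := by
      cases hsp : PySem.List.sorted pairs (fun x => x.1) with
      | nil => exfalso; rw [hsp] at hlen; exact hp (List.eq_nil_of_length_eq_zero hlen.symm)
      | cons p0 rest => exact ⟨p0, rest, rfl⟩
    rw [hps, PySem.List.pyGet?_zero_cons, PySem.List.slice_from_one]
    simp only [List.tail_cons]
    rw [pvA_loop g rest p0 [] [p0], pvB_cuts g rest p0 0]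
    have hcast : (0 : Int) :: (pvCut g p0 rest).map (fun n : Nat => (0 : Int) + (n : Int))
        ++ [((p0 :: rest).length : Int)]
        = (0 :: pvCut g p0 rest ++ [rest.length + 1]).map (Nat.cast : Nat → Int) := by
      simp [List.map_append]
    rw [hcast, pvSegs_cast, pvB_main]
    simp
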